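-- pv_equiv track=rewrite | github.com/kdn8gbqph2-jpg/bda-lmis | backend/colonies/management/commands/_krutidev.py | _move_pre_matra
-- ===== SOURCE A (Python) =====
-- _LIGATURES = (
--     'Hk', '"k', "'k", '?k', '/k', '.k', '{k',
--     'lz', 'iz', 'kz', 'pz', 'LF', 'Lr', 'Yi', 'pj',
-- )
--
-- def _move_pre_matra(s: str) -> str:
--     """Swap 'f<cluster>' (pre-matra इ) → '<cluster>ि'.
--
--     'f' followed by a known ligature consumes 2 chars; otherwise just 1.
--     """
--     out, i, n = [], 0, len(s)
--     while i < n: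
--         if s[i] == 'f' and i + 1 < n:
--             if i + 2 < n and s[i+1:i+3] in _LIGATURES:
--                 out.append(s[i+1:i+3])
--                 out.append('ि')
--                 i += 3
--             else:
--                 out.append(s[i+1])
--                 out.append('ि')
--                 i += 2
--         else:
--             out.append(s[i])
--             i += 1
--     return ''.join(out)
-- ===== SOURCE B (Python) =====
-- import re
--
-- _LIGATURES = (
--     'Hk', '"k', "'k", '?k', '/k', '.k', '{k',
--     'lz', 'iz', 'kz', 'pz', 'LF', 'Lr', 'Yi', 'pj',
-- )
--
-- _PATTERN = re.compile(
--     'f(' + '|'.join(re.escape(lig) for lig in _LIGATURES) + '|.)',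
--     re.DOTALL,
-- )
--
-- def _move_pre_matra(s: str) -> str:
--     """Swap 'f<cluster>' (pre-matra) via one regex substitution."""
--     return _PATTERN.sub(lambda m: m.group(1) + '\u093f', s)
-- ===== Notes on version B (the rewrite author's own statement) =====
-- stated objective: idiomatic
-- what changed: Replaced the manual index/while loop with out-list bookkeeping by a single compiled re.sub whose ordered alternation (escaped ligatures before '.', DOTALL) does the cluster matching.
import Mathlib
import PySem

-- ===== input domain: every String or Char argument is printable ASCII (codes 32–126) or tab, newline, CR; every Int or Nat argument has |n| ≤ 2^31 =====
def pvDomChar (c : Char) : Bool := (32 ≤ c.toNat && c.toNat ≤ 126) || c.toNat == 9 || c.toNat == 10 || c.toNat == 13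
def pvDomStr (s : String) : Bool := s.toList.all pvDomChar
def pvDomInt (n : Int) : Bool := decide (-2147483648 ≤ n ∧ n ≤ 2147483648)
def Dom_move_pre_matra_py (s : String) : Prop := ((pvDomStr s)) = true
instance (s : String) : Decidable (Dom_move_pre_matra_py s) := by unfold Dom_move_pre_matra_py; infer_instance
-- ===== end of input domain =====

-- B replaces A's manual index/while loop by one regex substitution (ported as the
-- left-to-right scanner the compiled pattern denotes); objective: idiomatic, same cost.

-- the module constant _LIGATURES (a tuple of 2-char strings), as lists of chars
def pvLigs : List (List Char) :=
  [['H','k'], ['"','k'], ['\'','k'], ['?','k'], ['/','k'], ['.','k'],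
   ['{','k'], ['l','z'], ['i','z'], ['k','z'], ['p','z'], ['L','F'],
   ['L','r'], ['Y','i'], ['p','j']]

-- ===== PORT A =====
-- A's while loop over index i, building `out` (emitted pieces, concatenated in order)
-- fuel = cs.length - i bounds the remaining iterations; each step advances i by ≥ 1
def pvALoop : Nat → List Char → Nat → List Char
  | 0, _, _ => []
  | fuel + 1, cs, i =>
    if h : i < cs.length then
      if h2 : cs[i] = 'f' ∧ i + 1 < cs.length then
        if i + 2 < cs.length ∧ PySem.List.slice cs (some ((i : Int) + 1)) (some ((i : Int) + 3)) ∈ pvLigs then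
          PySem.List.slice cs (some ((i : Int) + 1)) (some ((i : Int) + 3)) ++ 'ि' :: pvALoop fuel cs (i + 3)
        else
          cs[i + 1]'h2.2 :: 'ि' :: pvALoop fuel cs (i + 2)
      else
        cs[i] :: pvALoop fuel cs (i + 1)
    else []

def move_pre_matra_py (s : String) : String := String.ofList (pvALoop s.toList.length s.toList 0)

-- ===== PORT B =====
-- Source B does `_PATTERN.sub(lambda m: m.group(1) + 'ि', s)` with
-- _PATTERN = 'f(' + '|'.join(escaped ligatures) + '|.)' under DOTALL.
-- Ported by hand as the scanner that pattern denotes (exact for this pattern):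
-- re.sub scans left to right; at 'f' the group tries each ligature alternative in
-- _LIGATURES order, then '.', which under DOTALL matches any single character.

-- the group's ordered alternation: first ligature alternative matching here
def pvFindLig (rest : List Char) : Option (List Char) :=
  pvLigs.find? (fun l => l.isPrefixOf rest)

-- fuel bounds the scanner's steps (≥ remaining length; each match consumes ≥ 1 char)
def pvBLoop : Nat → List Char → List Char
  | 0, _ => []
  | _ + 1, [] => []
  | fuel + 1, c :: rest =>
    if c = 'f' then
      match pvFindLig rest with
      | some lig => lig ++ 'ि' :: pvBLoop fuel (rest.drop lig.length)
      | none =>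
        match rest with
        | d :: rest' => d :: 'ि' :: pvBLoop fuel rest'   -- the '.' alternative (DOTALL)
        | [] => [c]                                       -- trailing 'f': no match, copied verbatim
    else c :: pvBLoop fuel rest

def move_pre_matra_py_alt (s : String) : String := String.ofList (pvBLoop s.toList.length s.toList)

-- ===== PRECONDITION & SPEC =====
def Spec_move_pre_matra_py (s : String) (out : String) : Prop := out = move_pre_matra_py_alt s
instance (s : String) (out : String) : Decidable (Spec_move_pre_matra_py s out) := by unfold Spec_move_pre_matra_py; infer_instance

-- ===== CLAIM (what is proved, stated in full; the proofs are below) =====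
def Claim_equal_move_pre_matra_py : Prop := ∀ (s : String), Dom_move_pre_matra_py s → Spec_move_pre_matra_py s (move_pre_matra_py s)

-- ===== LEMMAS AND PROOFS =====

lemma pvLigs_len : ∀ l ∈ pvLigs, l.length = 2 := by decide

lemma find_pref (L : List (List Char)) (hL : ∀ l ∈ L, l.length = 2) (rest : List Char) :
    L.find? (fun l => l.isPrefixOf rest) =
      if rest.take 2 ∈ L then some (rest.take 2) else none := by
  induction L with
  | nil => simp
  | cons a L ih =>
    have ha : a.length = 2 := hL a (by simp)
    have key : a.isPrefixOf rest = true ↔ rest.take 2 = a := by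
      rw [List.isPrefixOf_iff_prefix]
      constructor
      · rintro ⟨t, ht⟩
        subst ht
        rw [← ha, List.take_left]
      · intro hq
        rw [← hq]; exact List.take_prefix 2 rest
    by_cases hp : a.isPrefixOf rest = true
    · have := key.mp hp
      simp [hp, this]
    · have hne : rest.take 2 ≠ a := fun hq => hp (key.mpr hq)
      rw [List.find?_cons_of_neg (by simpa using hp),
          ih (fun l hl => hL l (List.mem_cons_of_mem _ hl))]
      simp [List.mem_cons, hne]

lemma pvFindLig_eq (rest : List Char) :
    pvFindLig rest = if rest.take 2 ∈ pvLigs then some (rest.take 2) else none :=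
  find_pref pvLigs pvLigs_len rest

lemma pvFindLig_nil : pvFindLig [] = none := by decide

lemma pvBLoop_nil (g : Nat) : pvBLoop g [] = [] := by
  cases g <;> rw [pvBLoop]

lemma pvBLoop_cons (g : Nat) (c : Char) (rest : List Char) :
    pvBLoop (g + 1) (c :: rest) =
      if c = 'f' then
        match pvFindLig rest with
        | some lig => lig ++ 'ि' :: pvBLoop g (rest.drop lig.length)
        | none =>
          match rest with
          | d :: rest' => d :: 'ि' :: pvBLoop g rest'
          | [] => [c]
      else c :: pvBLoop g rest := by
  rw [pvBLoop.eq_def]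

lemma pvBLoop_f_some (g : Nat) (rest lig : List Char) (h : pvFindLig rest = some lig) :
    pvBLoop (g + 1) ('f' :: rest) = lig ++ 'ि' :: pvBLoop g (rest.drop lig.length) := by
  rw [pvBLoop_cons, if_pos rfl, h]

lemma pvBLoop_f_none_cons (g : Nat) (d : Char) (rest' : List Char)
    (h : pvFindLig (d :: rest') = none) :
    pvBLoop (g + 1) ('f' :: d :: rest') = d :: 'ि' :: pvBLoop g rest' := by
  rw [pvBLoop_cons, if_pos rfl, h]

lemma pvBLoop_f_nil (g : Nat) : pvBLoop (g + 1) ['f'] = ['f'] := by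
  rw [pvBLoop_cons, if_pos rfl, pvFindLig_nil]

lemma slice_eq_take (cs : List Char) (i : Nat) :
    PySem.List.slice cs (some ((i : Int) + 1)) (some ((i : Int) + 3)) = (cs.drop (i + 1)).take 2 := by
  have h1 : ((i : Int) + 1) = ((i + 1 : Nat) : Int) := by push_cast; ring
  have h3 : ((i : Int) + 3) = ((i + 3 : Nat) : Int) := by push_cast; ring
  rw [h1, h3, PySem.List.slice_natCast]
  have e : i + 3 - (i + 1) = 2 := by omega
  rw [e]

lemma pvALoop_done (f : Nat) (cs : List Char) (i : Nat) (h : cs.length ≤ i) :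
    pvALoop f cs i = [] := by
  cases f
  · rw [pvALoop]
  · rw [pvALoop, dif_neg (by omega)]

lemma pv_main (cs : List Char) :
    ∀ f g i, cs.length - i ≤ f → cs.length - i ≤ g →
      pvALoop f cs i = pvBLoop g (cs.drop i) := by
  intro f
  induction f with
  | zero =>
    intro g i hf hg
    have h : cs.length ≤ i := by omega
    rw [pvALoop, List.drop_eq_nil_of_le h, pvBLoop_nil]
  | succ f ih =>
    intro g i hf hg
    rw [pvALoop]
    by_cases h : i < cs.length
    · rw [dif_pos h]
      obtain ⟨g', rfl⟩ : ∃ g', g = g' + 1 := ⟨g - 1, by omega⟩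
      have hdrop : cs.drop i = cs[i] :: cs.drop (i + 1) := List.drop_eq_getElem_cons h
      by_cases hf' : cs[i] = 'f'
      · by_cases h1 : i + 1 < cs.length
        · rw [dif_pos ⟨hf', h1⟩, slice_eq_take]
          by_cases hL : (cs.drop (i + 1)).take 2 ∈ pvLigs
          · have hsome : pvFindLig (cs.drop (i + 1)) = some ((cs.drop (i + 1)).take 2) := by
              rw [pvFindLig_eq, if_pos hL]
            have hlen2 : ((cs.drop (i + 1)).take 2).length = 2 := pvLigs_len _ hL
            have h2 : i + 2 < cs.length := by
              simp [List.length_take, List.length_drop] at hlen2; omega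
            rw [if_pos ⟨h2, hL⟩, hdrop, hf', pvBLoop_f_some _ _ _ hsome, hlen2,
                ih g' (i + 3) (by omega) (by omega)]
            have e : List.drop 2 (List.drop (i + 1) cs) = List.drop (i + 3) cs := by
              rw [List.drop_drop]
            rw [e]
          · have hnone : pvFindLig (cs.drop (i + 1)) = none := by
              rw [pvFindLig_eq, if_neg hL]
            have hdrop1 : cs.drop (i + 1) = cs[i + 1] :: cs.drop (i + 2) :=
              List.drop_eq_getElem_cons h1
            rw [if_neg (fun hc => hL hc.2), hdrop, hdrop1]
            simp only [hf']
            rw [pvBLoop_f_none_cons _ _ _ (hdrop1 ▸ hnone), ih g' (i + 2) (by omega) (by omega)]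
        · rw [dif_neg (fun hc => h1 hc.2), pvALoop_done f cs (i + 1) (by omega), hdrop,
              List.drop_eq_nil_of_le (by omega)]
          simp only [hf']
          rw [pvBLoop_f_nil]
      · rw [dif_neg (fun hc => hf' hc.1), hdrop, pvBLoop_cons, if_neg hf',
            ih g' (i + 1) (by omega) (by omega)]
    · rw [dif_neg h, List.drop_eq_nil_of_le (by omega), pvBLoop_nil]

-- ===== VERDICT (by name: the statement is the Claim_ definition above) =====
theorem move_pre_matra_py_spec : Claim_equal_move_pre_matra_py := by
  intro s _
  unfold Spec_move_pre_matra_py move_pre_matra_py move_pre_matra_py_alt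
  rw [pv_main s.toList s.toList.length s.toList.length 0 (by omega) (by omega), List.drop_zero]
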